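-- pv_equiv track=rewrite | github.com/ThatAquarel/scintillating_chamber | drafts/test_1.py | check_detector
-- ===== SOURCE A (Python) =====
-- def check_detector(detector, trajectory_x, trajectory_y):
--     """
--     Returns the detectors best guess for the muon position
--     """
--
--     estimate_x = [0, 2000]
--     estimate_y = [0, 2000]
--
--     for level_n, level_rods in enumerate(detector):
--         if (level_n % 2) == 0:  # Check x levels
--             for rod in level_rods:
--                 if rod[0] < trajectory_x < rod[1]:  # Check if muons is in bounds
--                     if rod[0] > estimate_x[0]:  # Check if current guess can be refined
--                         estimate_x[0] = rod[0]
--                     if rod[1] < estimate_x[1]: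
--                         estimate_x[1] = rod[1]
--                     break
--         else:  # Check for y levels
--             for rod in level_rods:
--                 if rod[0] < trajectory_y < rod[1]:  # Check if muons is in bounds
--                     if rod[0] > estimate_y[0]:  # Check if current guess can be refined
--                         estimate_y[0] = rod[0]
--                     if rod[1] < estimate_y[1]:
--                         estimate_y[1] = rod[1]
--                     break
--
--     return estimate_x, estimate_y
-- ===== SOURCE B (Python) =====
-- def check_detector(detector, trajectory_x, trajectory_y):
--     """
--     Divide-and-conquer reformulation: the bounds are the intersection of the
--     first-hit intervals; split the levels in halves, solve each half (swapping
--     the x/y roles when the left half has odd length), and merge by interval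
--     intersection (max of lows, min of highs).
--     """
--     def solve(levels, t, u):
--         # bounds ((t_lo, t_hi), (u_lo, u_hi)) for alternating levels starting with t
--         n = len(levels)
--         if n == 0:
--             return (0, 2000), (0, 2000)
--         if n == 1:
--             hit = next((rod for rod in levels[0] if rod[0] < t < rod[1]), None)
--             if hit is None:
--                 return (0, 2000), (0, 2000)
--             return (max(0, hit[0]), min(2000, hit[1])), (0, 2000)
--         m = n // 2
--         lt, lu = solve(levels[:m], t, u)
--         if m % 2 == 0:
--             rt, ru = solve(levels[m:], t, u)
--         else:
--             ru, rt = solve(levels[m:], u, t)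
--         return (max(lt[0], rt[0]), min(lt[1], rt[1])), (max(lu[0], ru[0]), min(lu[1], ru[1]))
--
--     xb, yb = solve(detector, trajectory_x, trajectory_y)
--     return [xb[0], xb[1]], [yb[0], yb[1]]
-- ===== Notes on version B (the rewrite author's own statement) =====
-- stated objective: alternative
-- what changed: A narrows the [0,2000] bounds in place with conditional updates and a break inside a single parity-switching loop; B is a divide-and-conquer: it splits the levels in halves, recursively computes the bounds of each half (swapping x/y roles when the left half has odd length) and merges them by interval intersection (max of lows, min of highs).
-- outside the precondition, e.g. on check_detector([[[1, 9], []]], 5, 0): A returns ([1, 9], [0, 2000]), B returns ([1, 9], [0, 2000])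
import Mathlib
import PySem

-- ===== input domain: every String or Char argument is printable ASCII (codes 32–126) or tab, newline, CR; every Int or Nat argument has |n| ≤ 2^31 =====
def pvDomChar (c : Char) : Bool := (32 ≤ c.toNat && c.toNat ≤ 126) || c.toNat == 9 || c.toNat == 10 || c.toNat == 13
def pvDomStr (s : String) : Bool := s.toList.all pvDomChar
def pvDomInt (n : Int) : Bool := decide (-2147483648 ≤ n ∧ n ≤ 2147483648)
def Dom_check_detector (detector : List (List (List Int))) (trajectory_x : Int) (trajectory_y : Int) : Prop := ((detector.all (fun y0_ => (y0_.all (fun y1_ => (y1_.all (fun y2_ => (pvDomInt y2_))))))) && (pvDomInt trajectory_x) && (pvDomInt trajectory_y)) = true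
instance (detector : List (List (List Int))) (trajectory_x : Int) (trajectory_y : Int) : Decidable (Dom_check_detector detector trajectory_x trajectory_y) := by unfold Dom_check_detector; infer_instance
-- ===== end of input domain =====

-- B replaces A's in-place narrowing loop by a divide-and-conquer over the levels
-- (solve halves with role swap, merge by interval intersection); objective: alternative.

-- ===== PORT A =====
-- inner 'for rod in level_rods: … break' loop; rod[0]/rod[1] ported as getD (Python raises
-- on a short rod there; such inputs are excluded by Pre_check_detector)
def pvScanA (t : Int) (e : Int × Int) : List (List Int) → Int × Int
  | [] => e
  | rod :: rest =>
    if rod.getD 0 0 < t ∧ t < rod.getD 1 0 then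
      ((if rod.getD 0 0 > e.1 then rod.getD 0 0 else e.1),
       (if rod.getD 1 0 < e.2 then rod.getD 1 0 else e.2))
    else pvScanA t e rest

-- outer 'for level_n, level_rods in enumerate(detector)' loop, state (estimate_x, estimate_y)
def pvLoopA (x y : Int) (n : Int) (ex ey : Int × Int) : List (List (List Int)) → (Int × Int) × (Int × Int)
  | [] => (ex, ey)
  | lv :: rest =>
    if n % 2 = 0 then pvLoopA x y (n + 1) (pvScanA x ex lv) ey rest
    else pvLoopA x y (n + 1) ex (pvScanA y ey lv) rest

def check_detector (detector : List (List (List Int))) (trajectory_x : Int) (trajectory_y : Int) : List Int × List Int :=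
  let r := pvLoopA trajectory_x trajectory_y 0 (0, 2000) (0, 2000) detector
  ([r.1.1, r.1.2], [r.2.1, r.2.2])

-- ===== PORT B =====
-- next((rod for rod in rods if rod[0] < t < rod[1]), None) of Source B
def pvFirstHit (rods : List (List Int)) (t : Int) : Option (List Int) :=
  match rods with
  | [] => none
  | rod :: rest => if rod.getD 0 0 < t ∧ t < rod.getD 1 0 then some rod else pvFirstHit rest t

-- 'solve' of Source B: divide and conquer on the levels; levels[:m]/levels[m:] are take/drop;
-- the Nat fuel (= number of levels, strictly decreasing across halvings) is only a
-- structural-termination guard, the 'fuel exhausted' branch is never reached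
def pvSolveGo : Nat → List (List (List Int)) → Int → Int → (Int × Int) × (Int × Int)
  | _, [], _, _ => ((0, 2000), (0, 2000))
  | _, [lv], t, _ =>
    (match pvFirstHit lv t with
     | none => ((0, 2000), (0, 2000))
     | some h => ((max 0 (h.getD 0 0), min 2000 (h.getD 1 0)), (0, 2000)))
  | 0, _ :: _ :: _, _, _ => ((0, 2000), (0, 2000))
  | f + 1, a :: b :: rest, t, u =>
    let m := (a :: b :: rest).length / 2
    let L := pvSolveGo f ((a :: b :: rest).take m) t u
    let R := if m % 2 = 0 then pvSolveGo f ((a :: b :: rest).drop m) t u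
             else (let r := pvSolveGo f ((a :: b :: rest).drop m) u t; (r.2, r.1))
    ((max L.1.1 R.1.1, min L.1.2 R.1.2), (max L.2.1 R.2.1, min L.2.2 R.2.2))

def pvSolve (levels : List (List (List Int))) (t u : Int) : (Int × Int) × (Int × Int) :=
  pvSolveGo levels.length levels t u

def check_detector_alt (detector : List (List (List Int))) (trajectory_x : Int) (trajectory_y : Int) : List Int × List Int :=
  let r := pvSolve detector trajectory_x trajectory_y
  ([r.1.1, r.1.2], [r.2.1, r.2.2])

-- ===== PRECONDITION & SPEC =====
-- Pre_ excludes inputs where a rod reachable by the scan could make Python's rod[0]/rod[1]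
-- raise IndexError: every rod must have ≥ 2 entries, or be nonempty with rod[0] ≥ its level's
-- trajectory (so the chained comparison short-circuits before rod[1]); this is conservative —
-- rods shadowed by the break are excluded too even though A still returns there (see cites).
def Pre_check_detector (detector : List (List (List Int))) (trajectory_x : Int) (trajectory_y : Int) : Prop :=
  ∀ p ∈ PySem.List.enumerate detector 0, ∀ rod ∈ p.2,
    2 ≤ rod.length ∨ (rod ≠ [] ∧ (if p.1 % 2 = 0 then trajectory_x else trajectory_y) ≤ rod.headD 0)
instance (detector : List (List (List Int))) (trajectory_x : Int) (trajectory_y : Int) : Decidable (Pre_check_detector detector trajectory_x trajectory_y) := by unfold Pre_check_detector; infer_instance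

def pvWitness_check_detector : List (List (List Int)) × Int × Int := ([[[1, 9]], [[2, 8]]], 5, 5)

def Spec_check_detector (detector : List (List (List Int))) (trajectory_x : Int) (trajectory_y : Int) (out : List Int × List Int) : Prop := out = check_detector_alt detector trajectory_x trajectory_y
instance (detector : List (List (List Int))) (trajectory_x : Int) (trajectory_y : Int) (out : List Int × List Int) : Decidable (Spec_check_detector detector trajectory_x trajectory_y out) := by unfold Spec_check_detector; infer_instance

-- ===== CLAIM (what is proved, stated in full; the proofs are below) =====
def Claim_equal_check_detector : Prop := ∀ (detector : List (List (List Int))) (trajectory_x : Int) (trajectory_y : Int), Dom_check_detector detector trajectory_x trajectory_y → Pre_check_detector detector trajectory_x trajectory_y → Spec_check_detector detector trajectory_x trajectory_y (check_detector detector trajectory_x trajectory_y)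

-- ===== LEMMAS AND PROOFS =====

-- proof-side spec: first matching rod of each level, split by parity via role-swapping recursion
def pvHits2 : List (List (List Int)) → Int → Int → List (List Int) × List (List Int)
  | [], _, _ => ([], [])
  | lv :: rest, t, u =>
    let r := pvHits2 rest u t
    ((match pvFirstHit lv t with | none => r.2 | some h => h :: r.2), r.1)

-- fold of the low/high bounds over a hit list
def pvLo (H : List (List Int)) (a : Int) : Int := (H.map (fun h => h.getD 0 0)).foldl max a
def pvHi (H : List (List Int)) (a : Int) : Int := (H.map (fun h => h.getD 1 0)).foldl min a

theorem pvLo_nil (a : Int) : pvLo [] a = a := rfl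
theorem pvHi_nil (a : Int) : pvHi [] a = a := rfl
theorem pvLo_cons (h : List Int) (H : List (List Int)) (a : Int) :
    pvLo (h :: H) a = pvLo H (max a (h.getD 0 0)) := rfl
theorem pvHi_cons (h : List Int) (H : List (List Int)) (a : Int) :
    pvHi (h :: H) a = pvHi H (min a (h.getD 1 0)) := rfl

theorem pvLo_hoist (H : List (List Int)) : ∀ a b : Int, pvLo H (max a b) = max a (pvLo H b) := by
  induction H with
  | nil => intro a b; rfl
  | cons h H ih =>
    intro a b
    rw [pvLo_cons, pvLo_cons, max_assoc, ih]

theorem pvHi_hoist (H : List (List Int)) : ∀ a b : Int, pvHi H (min a b) = min a (pvHi H b) := by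
  induction H with
  | nil => intro a b; rfl
  | cons h H ih =>
    intro a b
    rw [pvHi_cons, pvHi_cons, min_assoc, ih]

theorem pvLo_ge (H : List (List Int)) : ∀ a : Int, a ≤ pvLo H a := by
  induction H with
  | nil => intro a; exact le_refl a
  | cons h H ih =>
    intro a
    rw [pvLo_cons]
    exact le_trans (le_max_left _ _) (ih _)

theorem pvHi_le (H : List (List Int)) : ∀ a : Int, pvHi H a ≤ a := by
  induction H with
  | nil => intro a; exact le_refl a
  | cons h H ih =>
    intro a
    rw [pvHi_cons]
    exact le_trans (ih _) (min_le_left _ _)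

theorem pvLo_append (H1 H2 : List (List Int)) :
    pvLo (H1 ++ H2) 0 = max (pvLo H1 0) (pvLo H2 0) := by
  have h1 : pvLo (H1 ++ H2) 0 = pvLo H2 (pvLo H1 0) := by
    simp [pvLo, List.foldl_append]
  have h2 : (max (pvLo H1 0) 0) = pvLo H1 0 := max_eq_left (pvLo_ge H1 0)
  rw [h1, ← h2, pvLo_hoist]
  rw [h2]

theorem pvHi_append (H1 H2 : List (List Int)) :
    pvHi (H1 ++ H2) 2000 = min (pvHi H1 2000) (pvHi H2 2000) := by
  have h1 : pvHi (H1 ++ H2) 2000 = pvHi H2 (pvHi H1 2000) := by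
    simp [pvHi, List.foldl_append]
  have h2 : (min (pvHi H1 2000) 2000) = pvHi H1 2000 := min_eq_left (pvHi_le H1 2000)
  rw [h1, ← h2, pvHi_hoist]
  rw [h2]

theorem pvScanA_eq (t : Int) (e : Int × Int) (lv : List (List Int)) :
    pvScanA t e lv = match pvFirstHit lv t with
      | none => e
      | some h => (max e.1 (h.getD 0 0), min e.2 (h.getD 1 0)) := by
  induction lv with
  | nil => rfl
  | cons rod rest ih =>
    simp only [pvScanA, pvFirstHit]
    by_cases h : rod.getD 0 0 < t ∧ t < rod.getD 1 0
    · rw [if_pos h, if_pos h]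
      have h1 : (if rod.getD 0 0 > e.1 then rod.getD 0 0 else e.1) = max e.1 (rod.getD 0 0) := by
        rw [max_def]; split_ifs <;> omega
      have h2 : (if rod.getD 1 0 < e.2 then rod.getD 1 0 else e.2) = min e.2 (rod.getD 1 0) := by
        rw [min_def]; split_ifs <;> omega
      rw [h1, h2]
    · rw [if_neg h, if_neg h]
      exact ih

-- A's loop in terms of the role-swapping hit lists
theorem pvLoopA_eq (x y : Int) (det : List (List (List Int))) :
    ∀ (n : Int) (ex ey : Int × Int),
    pvLoopA x y n ex ey det =
      if n % 2 = 0 then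
        ((pvLo (pvHits2 det x y).1 ex.1, pvHi (pvHits2 det x y).1 ex.2),
         (pvLo (pvHits2 det x y).2 ey.1, pvHi (pvHits2 det x y).2 ey.2))
      else
        ((pvLo (pvHits2 det y x).2 ex.1, pvHi (pvHits2 det y x).2 ex.2),
         (pvLo (pvHits2 det y x).1 ey.1, pvHi (pvHits2 det y x).1 ey.2)) := by
  induction det with
  | nil => intro n ex ey; split_ifs <;> rfl
  | cons lv rest ih =>
    intro n ex ey
    simp only [pvLoopA, pvHits2]
    by_cases hpar : n % 2 = 0
    · have hodd : ¬ ((n + 1) % 2 = 0) := by omega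
      rw [if_pos hpar, if_pos hpar, ih, if_neg hodd, pvScanA_eq]
      cases pvFirstHit lv x with
      | none => rfl
      | some h => simp [pvLo_cons, pvHi_cons]
    · have heven : (n + 1) % 2 = 0 := by omega
      rw [if_neg hpar, if_neg hpar, ih, if_pos heven, pvScanA_eq]
      cases pvFirstHit lv y with
      | none => rfl
      | some h => simp [pvLo_cons, pvHi_cons]

-- splitting the levels splits the hit lists (with a role swap when the left part has odd length)
theorem pvHits2_append (l1 : List (List (List Int))) :
    ∀ (l2 : List (List (List Int))) (t u : Int),
    pvHits2 (l1 ++ l2) t u =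
      if l1.length % 2 = 0 then
        ((pvHits2 l1 t u).1 ++ (pvHits2 l2 t u).1, (pvHits2 l1 t u).2 ++ (pvHits2 l2 t u).2)
      else
        ((pvHits2 l1 t u).1 ++ (pvHits2 l2 u t).2, (pvHits2 l1 t u).2 ++ (pvHits2 l2 u t).1) := by
  induction l1 with
  | nil => intro l2 t u; simp [pvHits2]
  | cons lv l1 ih =>
    intro l2 t u
    simp only [List.cons_append, pvHits2, List.length_cons]
    by_cases hpar : l1.length % 2 = 0
    · have h1 : ¬ ((l1.length + 1) % 2 = 0) := by omega
      rw [ih, if_pos hpar, if_neg h1]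
      cases pvFirstHit lv t <;> simp
    · have h1 : (l1.length + 1) % 2 = 0 := by omega
      rw [ih, if_neg hpar, if_pos h1]
      cases pvFirstHit lv t <;> simp

-- B's divide and conquer computes the same folds over the hit lists
theorem pvSolveGo_eq (f : Nat) : ∀ (levels : List (List (List Int))) (t u : Int),
    levels.length ≤ f →
    pvSolveGo f levels t u =
      ((pvLo (pvHits2 levels t u).1 0, pvHi (pvHits2 levels t u).1 2000),
       (pvLo (pvHits2 levels t u).2 0, pvHi (pvHits2 levels t u).2 2000)) := by
  induction f with
  | zero =>
    intro levels t u hle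
    match levels with
    | [] => simp [pvSolveGo, pvHits2, pvLo, pvHi]
    | lv :: rest => simp at hle
  | succ f ih =>
    intro levels t u hle
    match levels with
    | [] => simp [pvSolveGo, pvHits2, pvLo, pvHi]
    | [lv] =>
      cases hhit : pvFirstHit lv t with
      | none => simp [pvSolveGo, pvHits2, hhit, pvLo, pvHi]
      | some h =>
        simp [pvSolveGo, pvHits2, hhit, pvLo_cons, pvHi_cons, pvLo_nil, pvHi_nil]
    | a :: b :: rest =>
      have hsplit := pvHits2_append ((a :: b :: rest).take ((a :: b :: rest).length / 2))
        ((a :: b :: rest).drop ((a :: b :: rest).length / 2)) t u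
      rw [List.take_append_drop] at hsplit
      have hlen : ((a :: b :: rest).take ((a :: b :: rest).length / 2)).length
          = (a :: b :: rest).length / 2 := by
        rw [List.length_take]; omega
      have hlen2 : ((a :: b :: rest).drop ((a :: b :: rest).length / 2)).length
          = (a :: b :: rest).length - (a :: b :: rest).length / 2 := by
        rw [List.length_drop]
      rw [hlen] at hsplit
      have hT := ih ((a :: b :: rest).take ((a :: b :: rest).length / 2)) t u
        (by rw [hlen]; simp at hle ⊢; omega)
      have hD := ih ((a :: b :: rest).drop ((a :: b :: rest).length / 2)) t u
        (by rw [hlen2]; simp at hle ⊢; omega)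
      have hDs := ih ((a :: b :: rest).drop ((a :: b :: rest).length / 2)) u t
        (by rw [hlen2]; simp at hle ⊢; omega)
      by_cases hm : ((a :: b :: rest).length / 2) % 2 = 0
      · rw [if_pos hm] at hsplit
        rw [pvSolveGo]
        simp only [if_pos hm, hT, hD, hsplit, pvLo_append, pvHi_append]
      · rw [if_neg hm] at hsplit
        rw [pvSolveGo]
        simp only [if_neg hm, hT, hDs, hsplit, pvLo_append, pvHi_append]

theorem pvSolve_eq (levels : List (List (List Int))) (t u : Int) :
    pvSolve levels t u =
      ((pvLo (pvHits2 levels t u).1 0, pvHi (pvHits2 levels t u).1 2000),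
       (pvLo (pvHits2 levels t u).2 0, pvHi (pvHits2 levels t u).2 2000)) :=
  pvSolveGo_eq levels.length levels t u (le_refl _)

-- ===== VERDICT (by name: the statement is the Claim_ definition above) =====
theorem check_detector_spec : Claim_equal_check_detector := by
  intro det x y _ _
  show _ = _
  simp only [check_detector, check_detector_alt]
  rw [pvLoopA_eq, pvSolve_eq, if_pos (by norm_num : (0 : Int) % 2 = 0)]
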